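-- pv_equiv track=rewrite | github.com/Haskkor/ADS | Labs/3.5.1 Fréquence des lettres dans une chaîne.py | freqlettres
-- ===== SOURCE A (Python) =====
-- def freqlettres(chaine):
--     dictio = dict()
--     chaine = chaine.lower()
--     for i in chaine:
--         if i in "abcdefghijklmnopqrstuvwxyz":
--             if i in dictio:
--                 dictio[i] += 1
--             else:
--                 dictio[i] = 1
--     return dictio
-- ===== SOURCE B (Python) =====
-- def freqlettres(chaine):
--     letters = [c for c in chaine.lower() if c in "abcdefghijklmnopqrstuvwxyz"]
--     order = []
--     for c in letters:
--         if c not in order: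
--             order.append(c)
--     return {c: letters.count(c) for c in order}
-- ===== Notes on version B (the rewrite author's own statement) =====
-- stated objective: alternative
-- what changed: A builds the dict in one accumulating pass incrementing a counter per character; B first extracts the list of letters, dedups it in first-occurrence order, then computes each letter's count with a separate list.count scan.
import Mathlib
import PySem

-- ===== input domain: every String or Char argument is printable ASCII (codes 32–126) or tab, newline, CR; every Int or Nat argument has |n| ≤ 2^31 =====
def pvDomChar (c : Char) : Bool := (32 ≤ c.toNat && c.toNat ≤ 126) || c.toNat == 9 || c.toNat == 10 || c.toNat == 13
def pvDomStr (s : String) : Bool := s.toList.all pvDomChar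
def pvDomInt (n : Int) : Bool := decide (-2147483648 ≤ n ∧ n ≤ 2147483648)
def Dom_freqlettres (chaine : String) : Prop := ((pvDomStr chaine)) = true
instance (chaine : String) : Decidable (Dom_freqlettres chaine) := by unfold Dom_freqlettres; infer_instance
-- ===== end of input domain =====

-- B replaces A's single accumulating counter pass with filter → first-occurrence dedup → one count scan per distinct letter (alternative decomposition, same results).

-- ===== PORT A =====
-- literal port of A: lower the string, one pass over its characters updating a dict
def freqlettres (chaine : String) : List (String × Int) :=
  let lowered := PySem.Str.lower chaine
  let dictio :=
    lowered.toList.foldl (fun d i =>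
      if "abcdefghijklmnopqrstuvwxyz".toList.contains i then
        if d.contains (String.ofList [i]) then
          d.insert (String.ofList [i]) (d.getD (String.ofList [i]) 0 + 1)
        else
          d.insert (String.ofList [i]) 1
      else d) PySem.Dict.empty
  dictio.items

-- ===== PORT B =====
-- literal port of B: filter the letters, dedup in first-occurrence order, count each
def freqlettres_alt (chaine : String) : List (String × Int) :=
  let letters := (PySem.Str.lower chaine).toList.filter
    (fun c => "abcdefghijklmnopqrstuvwxyz".toList.contains c)
  let order := letters.foldl (fun acc c => PySem.Set.add acc c) ([] : PySem.Set Char)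
  (order.foldl (fun d c => d.insert (String.ofList [c]) ((letters.count c : Int)))
    PySem.Dict.empty).items

-- ===== PRECONDITION & SPEC =====
def Spec_freqlettres (chaine : String) (out : List (String × Int)) : Prop := out = freqlettres_alt chaine
instance (chaine : String) (out : List (String × Int)) : Decidable (Spec_freqlettres chaine out) := by unfold Spec_freqlettres; infer_instance

-- ===== CLAIM (what is proved, stated in full; the proofs are below) =====
def Claim_equal_freqlettres : Prop := ∀ (chaine : String), Dom_freqlettres chaine → Spec_freqlettres chaine (freqlettres chaine)

-- ===== LEMMAS AND PROOFS =====

theorem mkSingleton_injective : Function.Injective (fun c : Char => String.ofList [c]) := by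
  intro a b h
  have := congrArg String.toList h
  rw [String.toList_ofList, String.toList_ofList] at this
  exact List.singleton_injective this

-- A's two-branch update is the unconditional counter update
theorem branch_eq_insert_getD {d : PySem.Dict String Int} {k : String} :
    (if d.contains k then d.insert k (d.getD k 0 + 1) else d.insert k 1) =
    d.insert k (d.getD k 0 + 1) := by
  by_cases h : d.contains k = true
  · simp [h]
  · have hg : d.getD k 0 = 0 := by
      have : d.get? k = none := by
        rw [PySem.Dict.get?_eq_none_iff_not_mem_keys]
        intro hm
        exact h (by simpa [PySem.Dict.contains_eq_decide_mem_keys] using hm)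
      simp [PySem.Dict.getD, this]
    simp [h, hg]

-- ofList commutes with an injective map
theorem ofList_map_inj {α β : Type} [DecidableEq α] [DecidableEq β]
    (f : α → β) (hf : Function.Injective f) (l : List α) :
    PySem.Set.ofList (l.map f) = (PySem.Set.ofList l).map f := by
  induction l using List.reverseRecOn with
  | nil => rfl
  | append_singleton xs x ih =>
    rw [List.map_append, List.map_singleton,
        PySem.Set.ofList_eq_foldl, PySem.Set.ofList_eq_foldl,
        List.foldl_concat, List.foldl_concat,
        ← PySem.Set.ofList_eq_foldl, ← PySem.Set.ofList_eq_foldl, ih]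
    by_cases hm : x ∈ PySem.Set.ofList xs
    · have h2 : f x ∈ (PySem.Set.ofList xs).map f := List.mem_map_of_mem hm
      simp [PySem.Set.add, hm, h2]
    · have h2 : f x ∉ (PySem.Set.ofList xs).map f := by
        intro hmem
        obtain ⟨y, hy, hxy⟩ := List.mem_map.1 hmem
        exact hm (hf hxy ▸ hy)
      simp [PySem.Set.add, hm, h2]

-- ===== VERDICT (by name: the statement is the Claim_ definition above) =====
theorem freqlettres_spec : Claim_equal_freqlettres := by
  intro chaine _
  unfold Spec_freqlettres freqlettres freqlettres_alt
  dsimp only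
  rw [← PySem.Set.ofList_eq_foldl]
  simp only [branch_eq_insert_getD]
  rw [PySem.List.foldl_if_eq_foldl_filter,
      ← List.foldl_map (f := fun c : Char => String.ofList [c])
        (g := fun (d : PySem.Dict String Int) (x : String) => d.insert x (d.getD x 0 + 1)),
      PySem.Dict.foldl_insert_getD_add_one_eq_counter, PySem.Dict.items_counter]
  rw [PySem.Dict.items_foldl_insert_fresh _ _ _ _
        (by intro a _; simp [PySem.Dict.contains_empty])
        ((PySem.Set.nodup_ofList _).map mkSingleton_injective)]
  rw [ofList_map_inj _ mkSingleton_injective, List.map_map]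
  simp only [show (PySem.Dict.empty : PySem.Dict String Int).items = [] from rfl, List.nil_append]
  refine List.map_congr_left ?_
  intro c _
  dsimp only [Function.comp]
  rw [List.count_map_of_injective _ _ mkSingleton_injective]
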